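-- pv_equiv track=rewrite | github.com/PhilippMDoerner/SFDBTester | sfdbtester/sfdb/sfdb_tests.py | _compare_line
-- ===== SOURCE A (Python) =====
-- class ComparisonError(Exception):
--     pass
--
-- def _compare_line(new_line, old_line, i_ex_col_new, i_ex_col_old):
--     """Checks whether 2 lines of different SFDB files are identical or not.
--
--     Loops over the values and compares column by column. Checks every
--     iteration first whether a column in the new or the old line must be skipped.
--     Raises a ComparisonError if the lines don't have identical
--     numbers of columns after exclusion of the specified columns.
--
--     Parameters:
--         new_line(list): List of strings. A line from an updated SFDB file.
--         old_line(list): List of strings. A line from the previous SFDB file.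
--         i_ex_col_new(list): List of int. Indices of columns in new_line that
--             are excluded from the comparison.
--         i_ex_col_old(list): List of int. Indices of columns in old_line that
--             are excluded from the comparison.
--     Returns:
--         bool: True if lines are identical. False if they are not.
--     """
--     if not len(new_line) - len(i_ex_col_new) == len(old_line) - len(i_ex_col_old):
--         raise ComparisonError(f'Can not compare SFDB lines with unequal number of values!\n'
--                               f'Line new: {new_line}\nLine old: {old_line}\n'
--                               f'Excluded Columns 1: {i_ex_col_new}\n'
--                               f'Excluded Columns 2: {i_ex_col_old}')
--
--     i = 0
--     j = 0
--     while i < len(new_line) and j < len(old_line):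
--         if i_ex_col_new is not [] and i in i_ex_col_new:
--             i += 1
--             continue
--
--         if i_ex_col_old is not [] and j in i_ex_col_old:
--             j += 1
--             continue
--
--         if not new_line[i] == old_line[j]:
--             return False
--
--         i += 1
--         j += 1
--
--     return True
-- ===== SOURCE B (Python) =====
-- class ComparisonError(Exception):
--     pass
--
--
-- def _compare_line(new_line, old_line, i_ex_col_new, i_ex_col_old):
--     if not len(new_line) - len(i_ex_col_new) == len(old_line) - len(i_ex_col_old):
--         raise ComparisonError(f'Can not compare SFDB lines with unequal number of values!\n'
--                               f'Line new: {new_line}\nLine old: {old_line}\n'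
--                               f'Excluded Columns 1: {i_ex_col_new}\n'
--                               f'Excluded Columns 2: {i_ex_col_old}')
--
--     filtered_new = [v for k, v in enumerate(new_line) if k not in i_ex_col_new]
--     filtered_old = [v for k, v in enumerate(old_line) if k not in i_ex_col_old]
--     return all(a == b for a, b in zip(filtered_new, filtered_old))
-- ===== Notes on version B (the rewrite author's own statement) =====
-- stated objective: simpler
-- what changed: Replaced the interleaved two-index while loop (skip-and-compare in lockstep) by filtering each line once into its surviving values and comparing the two filtered lists with zip/all; the length guard and ComparisonError are kept verbatim.
import Mathlib
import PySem

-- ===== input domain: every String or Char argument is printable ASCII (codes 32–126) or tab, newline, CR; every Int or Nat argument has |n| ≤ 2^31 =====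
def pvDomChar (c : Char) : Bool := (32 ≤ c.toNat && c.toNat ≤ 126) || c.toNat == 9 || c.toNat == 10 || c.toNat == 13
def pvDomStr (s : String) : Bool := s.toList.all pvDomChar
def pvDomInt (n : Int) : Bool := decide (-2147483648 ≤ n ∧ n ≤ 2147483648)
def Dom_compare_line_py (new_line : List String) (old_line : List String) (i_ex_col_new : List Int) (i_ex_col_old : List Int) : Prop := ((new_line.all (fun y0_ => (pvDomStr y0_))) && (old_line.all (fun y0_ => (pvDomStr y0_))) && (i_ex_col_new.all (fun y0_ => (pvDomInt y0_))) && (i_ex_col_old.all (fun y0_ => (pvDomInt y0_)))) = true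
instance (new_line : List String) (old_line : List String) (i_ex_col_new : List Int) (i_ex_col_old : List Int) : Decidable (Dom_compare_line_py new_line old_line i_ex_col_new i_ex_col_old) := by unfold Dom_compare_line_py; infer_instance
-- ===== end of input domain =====

-- B filters each line once and compares the two filtered lists with zip/all, instead of A's
-- interleaved two-index while loop; objective: simpler. Both raise ComparisonError on the
-- length-mismatch guard (excluded by Pre_).

-- ===== PORT A =====
-- A's while loop: two indices i, j; skip i if excluded in new, else skip j if excluded in old,
-- else compare the two values; stops when either index runs off its line.
def compareLoopA (new_line old_line : List String) (exn exo : List Int) (i j : Nat) : Bool :=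
  if h : i < new_line.length ∧ j < old_line.length then
    if (i : Int) ∈ exn then compareLoopA new_line old_line exn exo (i + 1) j
    else if (j : Int) ∈ exo then compareLoopA new_line old_line exn exo i (j + 1)
    else if new_line.getD i "" == old_line.getD j "" then
      compareLoopA new_line old_line exn exo (i + 1) (j + 1)
    else false
  else true
termination_by (new_line.length - i) + (old_line.length - j)
decreasing_by all_goals omega

def compare_line_py (new_line : List String) (old_line : List String) (i_ex_col_new : List Int) (i_ex_col_old : List Int) : Bool :=
  if (new_line.length : Int) - i_ex_col_new.length = (old_line.length : Int) - i_ex_col_old.length then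
    compareLoopA new_line old_line i_ex_col_new i_ex_col_old 0 0
  else
    false  -- Python raises ComparisonError here; excluded by Pre_

-- ===== PORT B =====
-- [v for k, v in enumerate(line) if k not in excluded]
def filteredLine (line : List String) (ex : List Int) : List String :=
  (PySem.List.enumerate line).filterMap (fun p => if p.1 ∈ ex then none else some p.2)

def compare_line_py_alt (new_line : List String) (old_line : List String) (i_ex_col_new : List Int) (i_ex_col_old : List Int) : Bool :=
  if (new_line.length : Int) - i_ex_col_new.length = (old_line.length : Int) - i_ex_col_old.length then
    ((filteredLine new_line i_ex_col_new).zip (filteredLine old_line i_ex_col_old)).all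
      (fun p => p.1 == p.2)
  else
    false  -- Python raises ComparisonError here; excluded by Pre_

-- ===== PRECONDITION & SPEC =====
-- Pre_ excludes exactly the inputs on which A raises ComparisonError (the length guard).
def Pre_compare_line_py (new_line : List String) (old_line : List String) (i_ex_col_new : List Int) (i_ex_col_old : List Int) : Prop :=
  (new_line.length : Int) - i_ex_col_new.length = (old_line.length : Int) - i_ex_col_old.length
instance (new_line : List String) (old_line : List String) (i_ex_col_new : List Int) (i_ex_col_old : List Int) : Decidable (Pre_compare_line_py new_line old_line i_ex_col_new i_ex_col_old) := by unfold Pre_compare_line_py; infer_instance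

def pvWitness_compare_line_py : List String × List String × List Int × List Int :=
  (["a", "b", "c"], ["a", "c"], [(1 : Int)], [])

def Spec_compare_line_py (new_line : List String) (old_line : List String) (i_ex_col_new : List Int) (i_ex_col_old : List Int) (out : Bool) : Prop := out = compare_line_py_alt new_line old_line i_ex_col_new i_ex_col_old
instance (new_line : List String) (old_line : List String) (i_ex_col_new : List Int) (i_ex_col_old : List Int) (out : Bool) : Decidable (Spec_compare_line_py new_line old_line i_ex_col_new i_ex_col_old out) := by unfold Spec_compare_line_py; infer_instance

-- ===== CLAIM (what is proved, stated in full; the proofs are below) =====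
def Claim_equal_compare_line_py : Prop := ∀ (new_line : List String) (old_line : List String) (i_ex_col_new : List Int) (i_ex_col_old : List Int), Dom_compare_line_py new_line old_line i_ex_col_new i_ex_col_old → Pre_compare_line_py new_line old_line i_ex_col_new i_ex_col_old → Spec_compare_line_py new_line old_line i_ex_col_new i_ex_col_old (compare_line_py new_line old_line i_ex_col_new i_ex_col_old)

-- ===== LEMMAS AND PROOFS =====

-- The surviving values of `line` from raw index i onward (proof-side view of both programs).
def filtFrom (line : List String) (ex : List Int) (i : Nat) : List String :=
  if h : i < line.length then
    if (i : Int) ∈ ex then filtFrom line ex (i + 1)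
    else line.getD i "" :: filtFrom line ex (i + 1)
  else []
termination_by line.length - i
decreasing_by all_goals omega

theorem filtFrom_of_ge (line : List String) (ex : List Int) (i : Nat)
    (h : ¬ i < line.length) : filtFrom line ex i = [] := by
  unfold filtFrom; simp [h]

-- A's loop from (i, j) equals the zip/all comparison of the two surviving suffixes.
theorem filtFrom_skip (line : List String) (ex : List Int) (i : Nat)
    (h : i < line.length) (hi : (i : Int) ∈ ex) :
    filtFrom line ex i = filtFrom line ex (i + 1) := by
  rw [filtFrom]; simp [h, hi]

theorem filtFrom_cons (line : List String) (ex : List Int) (i : Nat)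
    (h : i < line.length) (hi : (i : Int) ∉ ex) :
    filtFrom line ex i = line.getD i "" :: filtFrom line ex (i + 1) := by
  rw [filtFrom]; simp [h, hi]

theorem compareLoopA_eq_zip (new_line old_line : List String) (exn exo : List Int)
    (i j : Nat) :
    compareLoopA new_line old_line exn exo i j =
      ((filtFrom new_line exn i).zip (filtFrom old_line exo j)).all (fun p => p.1 == p.2) := by
  unfold compareLoopA
  split
  · rename_i h
    by_cases hi : (i : Int) ∈ exn
    · rw [if_pos hi, filtFrom_skip new_line exn i h.1 hi]
      exact compareLoopA_eq_zip new_line old_line exn exo (i + 1) j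
    · rw [if_neg hi, filtFrom_cons new_line exn i h.1 hi]
      by_cases hj : (j : Int) ∈ exo
      · rw [if_pos hj, filtFrom_skip old_line exo j h.2 hj,
          compareLoopA_eq_zip new_line old_line exn exo i (j + 1),
          filtFrom_cons new_line exn i h.1 hi]
      · rw [if_neg hj, filtFrom_cons old_line exo j h.2 hj, List.zip_cons_cons, List.all_cons]
        by_cases he : new_line.getD i "" == old_line.getD j ""
        · rw [if_pos he, he, Bool.true_and]
          exact compareLoopA_eq_zip new_line old_line exn exo (i + 1) (j + 1)
        · rw [if_neg he, Bool.eq_false_iff.mpr he, Bool.false_and]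
  · rename_i h
    rcases Nat.lt_or_ge i new_line.length with hi | hi
    · have hj : ¬ j < old_line.length := by
        intro hj; exact h ⟨hi, hj⟩
      rw [filtFrom_of_ge old_line exo j hj]
      simp
    · rw [filtFrom_of_ge new_line exn i (by omega)]
      simp
termination_by (new_line.length - i) + (old_line.length - j)
decreasing_by all_goals omega

-- Bridging filtFrom with B's enumerate/filterMap filtering.
theorem filtFrom_eq_filterMap_enumerate (line : List String) (ex : List Int) (i : Nat) :
    filtFrom line ex i =
      (PySem.List.enumerate (line.drop i) i).filterMap
        (fun p => if p.1 ∈ ex then none else some p.2) := by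
  rw [filtFrom]
  split
  · rename_i h
    have hd : line.drop i = line.getD i "" :: line.drop (i + 1) := by
      rw [List.getD_eq_getElem _ _ h, ← List.getElem_cons_drop h]
    rw [hd]
    simp only [PySem.List.enumerate, List.filterMap_cons]
    have hcast : ((i : Int) + 1) = ((i + 1 : Nat) : Int) := by push_cast; ring
    by_cases hi : (i : Int) ∈ ex
    · simp only [hi, if_pos, hcast]
      exact filtFrom_eq_filterMap_enumerate line ex (i + 1)
    · simp only [hi, if_neg, not_false_iff, hcast]
      rw [filtFrom_eq_filterMap_enumerate line ex (i + 1)]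
  · rename_i h
    rw [List.drop_eq_nil_of_le (by omega)]
    simp [PySem.List.enumerate]
termination_by line.length - i
decreasing_by all_goals omega

theorem filtFrom_zero (line : List String) (ex : List Int) :
    filtFrom line ex 0 = filteredLine line ex := by
  rw [filtFrom_eq_filterMap_enumerate]
  simp [filteredLine]

-- ===== VERDICT (by name: the statement is the Claim_ definition above) =====
theorem compare_line_py_spec : Claim_equal_compare_line_py := by
  intro new_line old_line i_ex_col_new i_ex_col_old _ hpre
  have hpre' : (new_line.length : Int) - i_ex_col_new.length = (old_line.length : Int) - i_ex_col_old.length := hpre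
  unfold Spec_compare_line_py compare_line_py compare_line_py_alt
  rw [if_pos hpre', if_pos hpre', compareLoopA_eq_zip, filtFrom_zero, filtFrom_zero]
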